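-- pv_equiv track=rewrite | github.com/junyaoshi/frankmocap | ss_utils/data_stage_analysis.py | count_frame_pairs_by_stage
-- ===== SOURCE A (Python) =====
-- def count_frame_pairs_by_stage(frame_pairs, first_contact_frame, last_contact_frame):
--     # count number of pre-interaction and during-interaction frame pairs
--     pre_count, during_count = 0, 0
--     for frame_pair in frame_pairs:
--         cur_frame = int(frame_pair[0])
--         if cur_frame < first_contact_frame:
--             pre_count += 1
--         elif first_contact_frame <= cur_frame <= last_contact_frame:
--             during_count += 1
--
--     return pre_count, during_count
-- ===== SOURCE B (Python) =====
-- def count_frame_pairs_by_stage(frame_pairs, first_contact_frame, last_contact_frame):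
--     # sort the frame values, then read both counts off the two stage boundaries
--     vals = sorted(int(fp[0]) for fp in frame_pairs)
--     n = len(vals)
--     i = 0
--     while i < n and vals[i] < first_contact_frame:
--         i += 1
--     j = i
--     while j < n and vals[j] <= last_contact_frame:
--         j += 1
--     return i, j - i
-- ===== Notes on version B (the rewrite author's own statement) =====
-- stated objective: alternative
-- what changed: Replaces A's single pass with per-element three-way branching by sorting the frame values and reading both counts off the two stage boundaries with linear boundary scans (sort-then-boundary-lookup decomposition).
import Mathlib
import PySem

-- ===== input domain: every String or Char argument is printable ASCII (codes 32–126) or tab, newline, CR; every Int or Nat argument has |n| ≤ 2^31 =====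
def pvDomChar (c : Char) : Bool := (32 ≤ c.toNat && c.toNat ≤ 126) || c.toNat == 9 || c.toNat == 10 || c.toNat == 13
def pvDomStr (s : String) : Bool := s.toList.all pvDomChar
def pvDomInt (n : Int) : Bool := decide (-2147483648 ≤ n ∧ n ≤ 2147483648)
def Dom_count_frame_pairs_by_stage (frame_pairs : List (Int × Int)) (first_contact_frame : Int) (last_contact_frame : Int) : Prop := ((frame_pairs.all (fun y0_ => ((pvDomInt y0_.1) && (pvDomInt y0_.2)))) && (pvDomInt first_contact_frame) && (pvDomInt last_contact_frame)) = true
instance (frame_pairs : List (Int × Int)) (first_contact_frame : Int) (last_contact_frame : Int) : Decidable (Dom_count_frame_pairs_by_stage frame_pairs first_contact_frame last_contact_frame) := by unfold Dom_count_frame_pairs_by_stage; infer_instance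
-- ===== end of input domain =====

-- B replaces A's per-element branch scan by sort-then-boundary-scan (alternative decomposition, not faster).

-- ===== PORT A =====
-- literal transliteration of A's loop: one fold carrying (pre_count, during_count)
def count_frame_pairs_by_stage (frame_pairs : List (Int × Int)) (first_contact_frame : Int) (last_contact_frame : Int) : Int × Int :=
  frame_pairs.foldl
    (fun s frame_pair =>
      let cur_frame := frame_pair.1   -- int(frame_pair[0]) : identity on Int
      if cur_frame < first_contact_frame then (s.1 + 1, s.2)
      else if first_contact_frame ≤ cur_frame ∧ cur_frame ≤ last_contact_frame then (s.1, s.2 + 1)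
      else s)
    (0, 0)

-- ===== PORT B =====
-- B's 'while i < n and vals[i] < bound: i += 1' advancing over the sorted list:
-- count the elements the cursor passes and return the remaining tail.
def pvScanCount (p : Int → Bool) : List Int → Nat × List Int
  | [] => (0, [])
  | x :: xs => if p x then ((pvScanCount p xs).1 + 1, (pvScanCount p xs).2) else (0, x :: xs)

def count_frame_pairs_by_stage_alt (frame_pairs : List (Int × Int)) (first_contact_frame : Int) (last_contact_frame : Int) : Int × Int :=
  let vals := PySem.List.sorted (frame_pairs.map (fun fp => fp.1)) (fun x => x) false
  let s1 := pvScanCount (fun v => decide (v < first_contact_frame)) vals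
  let s2 := pvScanCount (fun v => decide (v ≤ last_contact_frame)) s1.2
  ((s1.1 : Int), (s2.1 : Int))    -- (i, j - i)

-- ===== PRECONDITION & SPEC =====
def Spec_count_frame_pairs_by_stage (frame_pairs : List (Int × Int)) (first_contact_frame : Int) (last_contact_frame : Int) (out : Int × Int) : Prop := out = count_frame_pairs_by_stage_alt frame_pairs first_contact_frame last_contact_frame
instance (frame_pairs : List (Int × Int)) (first_contact_frame : Int) (last_contact_frame : Int) (out : Int × Int) : Decidable (Spec_count_frame_pairs_by_stage frame_pairs first_contact_frame last_contact_frame out) := by unfold Spec_count_frame_pairs_by_stage; infer_instance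

-- ===== CLAIM (what is proved, stated in full; the proofs are below) =====
def Claim_equal_count_frame_pairs_by_stage : Prop := ∀ (frame_pairs : List (Int × Int)) (first_contact_frame : Int) (last_contact_frame : Int), Dom_count_frame_pairs_by_stage frame_pairs first_contact_frame last_contact_frame → Spec_count_frame_pairs_by_stage frame_pairs first_contact_frame last_contact_frame (count_frame_pairs_by_stage frame_pairs first_contact_frame last_contact_frame)

-- ===== LEMMAS AND PROOFS =====

-- A's fold computes the two countP's of its branch predicates.
theorem foldA_countP (f l : Int) (fp : List (Int × Int)) (a b : Int) :
    fp.foldl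
      (fun s frame_pair =>
        let cur_frame := frame_pair.1
        if cur_frame < f then (s.1 + 1, s.2)
        else if f ≤ cur_frame ∧ cur_frame ≤ l then (s.1, s.2 + 1)
        else s)
      (a, b)
    = (a + (fp.countP (fun p => decide (p.1 < f)) : Int),
       b + (fp.countP (fun p => decide (f ≤ p.1 ∧ p.1 ≤ l)) : Int)) := by
  induction fp generalizing a b with
  | nil => simp
  | cons x xs ih =>
    simp only [List.foldl_cons, List.countP_cons]
    by_cases h1 : x.1 < f
    · have h2 : ¬ (f ≤ x.1 ∧ x.1 ≤ l) := by omega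
      simp [h1, h2, ih]; omega
    · by_cases h2 : f ≤ x.1 ∧ x.1 ≤ l
      · simp [h1, h2, ih]; omega
      · simp [h1, h2, ih]

-- the scan is takeWhile/dropWhile
theorem pvScanCount_eq (p : Int → Bool) (xs : List Int) :
    pvScanCount p xs = ((xs.takeWhile p).length, xs.dropWhile p) := by
  induction xs with
  | nil => rfl
  | cons x xs ih =>
    by_cases h : p x <;> simp [pvScanCount, h, ih]

-- on a sorted list, the prefix passing a downward-closed test is all its satisfiers
theorem takeWhile_length_countP (p : Int → Bool) (xs : List Int)
    (hs : xs.Pairwise (· ≤ ·)) (hdc : ∀ a b : Int, a ≤ b → p b → p a) :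
    (xs.takeWhile p).length = xs.countP p := by
  induction xs with
  | nil => rfl
  | cons x xs ih =>
    rcases List.pairwise_cons.mp hs with ⟨hx, hxs⟩
    by_cases h : p x
    · simp [h, ih hxs]
    · have hz : xs.countP p = 0 := by
        rw [List.countP_eq_zero]
        intro y hy hpy
        exact h (hdc x y (hx y hy) hpy)
      simp [h, hz]

-- everything left after skipping the < f prefix of a sorted list is ≥ f
theorem dropWhile_all_ge (f : Int) (xs : List Int) (hs : xs.Pairwise (· ≤ ·)) :
    ∀ y ∈ xs.dropWhile (fun v => decide (v < f)), f ≤ y := by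
  induction xs with
  | nil => simp
  | cons x xs ih =>
    rcases List.pairwise_cons.mp hs with ⟨hx, hxs⟩
    by_cases h : x < f
    · simpa [List.dropWhile_cons, h] using ih hxs
    · intro y hy
      rw [List.dropWhile_cons] at hy
      simp only [decide_eq_true_eq, h, if_false] at hy
      rcases List.mem_cons.mp hy with rfl | hy
      · omega
      · exact le_trans (by omega) (hx y hy)

theorem count_frame_pairs_final (frame_pairs : List (Int × Int)) (f l : Int) :
    count_frame_pairs_by_stage frame_pairs f l = count_frame_pairs_by_stage_alt frame_pairs f l := by
  unfold count_frame_pairs_by_stage count_frame_pairs_by_stage_alt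
  set vals := PySem.List.sorted (frame_pairs.map (fun fp => fp.1)) (fun x => x) false with hvals
  have hperm : vals.Perm (frame_pairs.map (fun fp => fp.1)) := PySem.List.sorted_perm _ _ _
  have hpw : vals.Pairwise (· ≤ ·) := by
    simpa using PySem.List.sorted_pairwise (xs := frame_pairs.map (fun fp => fp.1)) (key := fun x => x)
  simp only [foldA_countP, pvScanCount_eq, zero_add]
  -- first component
  have h1 : (vals.takeWhile (fun v => decide (v < f))).length
      = frame_pairs.countP (fun p => decide (p.1 < f)) := by
    rw [takeWhile_length_countP _ _ hpw (by intro a b hab hb; simp at hb ⊢; omega)]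
    rw [hperm.countP_eq, List.countP_map]
    rfl
  -- second component
  have h2 : ((vals.dropWhile (fun v => decide (v < f))).takeWhile (fun v => decide (v ≤ l))).length
      = frame_pairs.countP (fun p => decide (f ≤ p.1 ∧ p.1 ≤ l)) := by
    have hpwd : (vals.dropWhile (fun v => decide (v < f))).Pairwise (· ≤ ·) :=
      hpw.sublist (List.dropWhile_sublist _)
    rw [takeWhile_length_countP _ _ hpwd (by intro a b hab hb; simp at hb ⊢; omega)]
    have hge := dropWhile_all_ge f vals hpw
    have hcongr : (vals.dropWhile (fun v => decide (v < f))).countP (fun v => decide (v ≤ l))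
        = (vals.dropWhile (fun v => decide (v < f))).countP (fun v => decide (f ≤ v ∧ v ≤ l)) := by
      apply List.countP_congr
      intro y hy
      have := hge y hy
      simp; omega
    rw [hcongr]
    have htw0 : (vals.takeWhile (fun v => decide (v < f))).countP (fun v => decide (f ≤ v ∧ v ≤ l)) = 0 := by
      rw [List.countP_eq_zero]
      intro y hy
      have := List.mem_takeWhile_imp hy
      simp at this ⊢; omega
    have hsplit : vals.countP (fun v => decide (f ≤ v ∧ v ≤ l))
        = (vals.takeWhile (fun v => decide (v < f))).countP (fun v => decide (f ≤ v ∧ v ≤ l))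
          + (vals.dropWhile (fun v => decide (v < f))).countP (fun v => decide (f ≤ v ∧ v ≤ l)) := by
      conv_lhs => rw [← List.takeWhile_append_dropWhile (p := fun v => decide (v < f)) (l := vals)]
      rw [List.countP_append]
    rw [← Nat.add_zero ((vals.dropWhile _).countP _), ← htw0, Nat.add_comm, ← hsplit,
        hperm.countP_eq, List.countP_map]
    rfl
  rw [h1, h2]

-- ===== VERDICT (by name: the statement is the Claim_ definition above) =====
theorem count_frame_pairs_by_stage_spec : Claim_equal_count_frame_pairs_by_stage := by
  intro fp f l _
  exact count_frame_pairs_final fp f l
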